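-- pv_equiv track=rewrite | github.com/pierrerousseau/games | strings/palyndroms.py | palyndrom_slices
-- ===== SOURCE A (Python) =====
-- def is_palyndrom(word):
--     """ :returns: True if <word> is a palyndrom
--
--         :param str word: a string
--     """
--     return word == word[::-1]
--
-- def palyndrom_slices(word, nb_slices):
--     """ :returns: True if all slices of <word> are palyndroms
--
--         :param str word: the word to slice
--         :param int nb_slice: the number of slices to check
--     """
--     are_palyndroms = []
--     for start in range(0, len(word)):
--         if nb_slices == 0:
--             if is_palyndrom(word):
--                 are_palyndroms.append(word)
--         else:
--             if is_palyndrom(word[:start]):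
--                 others = palyndrom_slices(word[start:],
--                                           nb_slices - 1)
--                 if others:
--                     are_palyndroms = [word[:start]] + others
--         if are_palyndroms:
--             break
--
--     return are_palyndroms
-- ===== SOURCE B (Python) =====
-- def palyndrom_slices(word, nb_slices):
--     """Bottom-up level DP: level k holds, for each suffix start i, the first
--     split of word[i:] into k+1 palindrome pieces (or None); the answer is
--     entry 0 of level nb_slices."""
--     if nb_slices < 0:
--         return []
--     n = len(word)
--     prev = [[word[i:]] if i < n and word[i:] == word[i:][::-1] else None
--             for i in range(n + 1)]
--     for _ in range(nb_slices):
--         cur = [None] * (n + 1)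
--         for i in range(n):
--             for j in range(i, n):
--                 piece = word[i:j]
--                 if piece == piece[::-1] and prev[j] is not None:
--                     cur[i] = [piece] + prev[j]
--                     break
--         prev = cur
--     return prev[0] if prev[0] is not None else []
-- ===== Notes on version B (the rewrite author's own statement) =====
-- stated objective: alternative
-- what changed: Replaces A's branching recursion by an iterative bottom-up DP: level k is a table giving, for every suffix start i, the first split of word[i:] into k+1 palindrome pieces, built nb_slices times from the previous level.
-- outside the precondition, e.g. on palyndrom_slices('a', -1): A raises RecursionError, B returns []
import Mathlib
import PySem

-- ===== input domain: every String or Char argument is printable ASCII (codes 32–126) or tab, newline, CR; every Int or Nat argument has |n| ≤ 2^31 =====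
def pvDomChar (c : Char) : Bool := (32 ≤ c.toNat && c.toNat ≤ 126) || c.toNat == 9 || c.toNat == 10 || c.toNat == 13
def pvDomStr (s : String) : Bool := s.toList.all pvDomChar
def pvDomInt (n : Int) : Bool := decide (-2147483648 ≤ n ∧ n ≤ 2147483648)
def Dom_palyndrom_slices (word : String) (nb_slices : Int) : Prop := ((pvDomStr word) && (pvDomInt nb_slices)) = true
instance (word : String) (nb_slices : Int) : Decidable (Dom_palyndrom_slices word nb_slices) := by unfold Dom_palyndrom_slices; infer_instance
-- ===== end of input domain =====

-- B replaces A's branching recursion by an iterative bottom-up level DP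
-- (level k = first split of each suffix into k+1 palindrome pieces).

-- ===== PORT A =====
-- Python `w == w[::-1]` (used by both Pythons as their palindrome test)
def pyIsPal (w : List Char) : Bool := w == w.reverse

-- the `for start in range(0, len(word))` loop of A; `starts` is the remaining
-- loop range.  `are_palyndroms` is empty at every loop entry (the loop breaks
-- as soon as it becomes non-empty), so it is not threaded; `step` is the value
-- the iteration gives it.  `fuel` bounds the recursion depth (Python's
-- recursion is depth nb_slices+1 on the inputs admitted by Pre_): the fuel-out
-- branch is unreachable there.
def goA (fuel : Nat) (w : List Char) (nb : Int) (starts : List Nat) : List (List Char) :=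
  match starts with
  | [] => []
  | s :: rest =>
    let step : List (List Char) :=
      if nb == 0 then
        (if pyIsPal w then [w] else [])
      else
        (if pyIsPal (w.take s) then
          if h : fuel = 0 then []   -- fuel guard only; unreachable under Pre_
          else
            let others := goA (fuel - 1) (w.drop s) (nb - 1) (List.range (w.drop s).length)
            if others.isEmpty then [] else w.take s :: others
        else [])
    if step.isEmpty then goA fuel w nb rest else step
termination_by (fuel, starts.length)

def palyndrom_slices (word : String) (nb_slices : Int) : List String :=
  (goA nb_slices.toNat word.toList nb_slices (List.range word.toList.length)).map String.ofList

-- ===== PORT B =====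
-- level 0 of the DP: prev[i] = [word[i:]] if word[i:] is a nonempty palindrome
def baseB (cs : List Char) : List (Option (List (List Char))) :=
  (List.range (cs.length + 1)).map
    (fun i => if i < cs.length ∧ pyIsPal (cs.drop i) then some [cs.drop i] else none)

-- the inner `for j in range(i, n): ... break` of B
def firstCutB (cs : List Char) (prev : List (Option (List (List Char)))) (i : Nat) :
    List Nat → Option (List (List Char))
  | [] => none
  | j :: rest =>
    let piece := (cs.drop i).take (j - i)      -- word[i:j]
    if pyIsPal piece then
      match prev.getD j none with
      | some r => some (piece :: r)
      | none => firstCutB cs prev i rest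
    else firstCutB cs prev i rest

-- one level update: cur[i] from prev (cur[n] stays None: empty j-range)
def levelB (cs : List Char) (prev : List (Option (List (List Char)))) :
    List (Option (List (List Char))) :=
  (List.range (cs.length + 1)).map (fun i => firstCutB cs prev i (List.range' i (cs.length - i)))

def palyndrom_slices_alt (word : String) (nb_slices : Int) : List String :=
  if nb_slices < 0 then []
  else
    match ((levelB word.toList)^[nb_slices.toNat] (baseB word.toList)).getD 0 none with
    | some r => r.map String.ofList
    | none => []

-- ===== PRECONDITION & SPEC =====
-- Pre_ excludes exactly the inputs on which A raises RecursionError under a plain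
-- CPython: a negative nb_slices with a nonempty word (A recurses on the same word
-- forever), and nb_slices ≥ 1000 with a nonempty word, where A's recursion depth
-- nb_slices+1 exceeds CPython's default recursion limit of 1000.
def Pre_palyndrom_slices (word : String) (nb_slices : Int) : Prop :=
  word = "" ∨ (0 ≤ nb_slices ∧ nb_slices < 1000)
instance (word : String) (nb_slices : Int) : Decidable (Pre_palyndrom_slices word nb_slices) := by
  unfold Pre_palyndrom_slices; infer_instance

def pvWitness_palyndrom_slices : String × Int := ("aab", 1)

def Spec_palyndrom_slices (word : String) (nb_slices : Int) (out : List String) : Prop :=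
  out = palyndrom_slices_alt word nb_slices
instance (word : String) (nb_slices : Int) (out : List String) :
    Decidable (Spec_palyndrom_slices word nb_slices out) := by
  unfold Spec_palyndrom_slices; infer_instance

-- ===== CLAIM (what is proved, stated in full; the proofs are below) =====
def Claim_equal_palyndrom_slices : Prop :=
  ∀ (word : String) (nb_slices : Int), Dom_palyndrom_slices word nb_slices →
    Pre_palyndrom_slices word nb_slices →
    Spec_palyndrom_slices word nb_slices (palyndrom_slices word nb_slices)

-- ===== LEMMAS AND PROOFS =====

-- reference function: solveO k w = the first split of w into k+1 palindrome
-- pieces in A's search order (none if there is none)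
mutual
def solveO : Nat → List Char → Option (List (List Char))
  | 0, w => if !w.isEmpty && pyIsPal w then some [w] else none
  | k + 1, w => solveFirst k w (List.range w.length)
termination_by k _ => (k, 0)
def solveFirst (k : Nat) (w : List Char) : List Nat → Option (List (List Char))
  | [] => none
  | s :: rest =>
    if pyIsPal (w.take s) then
      match solveO k (w.drop s) with
      | some r => some (w.take s :: r)
      | none => solveFirst k w rest
    else solveFirst k w rest
termination_by js => (k, js.length + 1)
end


lemma solveFirst_ne_nil (k : Nat) (w : List Char) :
    ∀ js r, solveFirst k w js = some r → r ≠ [] := by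
  intro js
  induction js with
  | nil => intro r h; simp [solveFirst] at h
  | cons s rest ih =>
    intro r h
    rw [solveFirst] at h
    split at h
    · cases hs : solveO k (w.drop s) with
      | some r' => rw [hs] at h; simp at h; simp [← h]
      | none => rw [hs] at h; exact ih r h
    · exact ih r h

lemma solveO_ne_nil (k : Nat) (w : List Char) (r : List (List Char)) :
    solveO k w = some r → r ≠ [] := by
  cases k with
  | zero =>
    intro h; rw [solveO] at h; split at h
    · simp at h; simp [← h]
    · simp at h
  | succ k =>
    intro h; rw [solveO] at h
    exact solveFirst_ne_nil k w _ r h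

lemma solveO_nil (k : Nat) : solveO k [] = none := by
  cases k with
  | zero => simp [solveO]
  | succ k => simp [solveO, List.range_zero, solveFirst]

-- A with nb_slices = 0: the loop returns [w] at the first iteration iff w is a
-- palindrome, else it does nothing over all iterations
lemma goA_zero (fuel : Nat) (w : List Char) :
    ∀ starts, starts ≠ [] →
      goA fuel w 0 starts = if pyIsPal w then [w] else [] := by
  intro starts
  induction starts with
  | nil => intro h; exact absurd rfl h
  | cons s rest ih =>
    intro _
    rw [goA]
    by_cases hp : pyIsPal w
    · simp [hp]
    · have hp' : pyIsPal w = false := by simpa using hp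
      by_cases hr : rest = []
      · subst hr; simp [goA, hp']
      · simp [hp', ih hr]

lemma goA_eq (k : Nat) :
    ∀ (fuel : Nat) (w : List Char), k ≤ fuel →
      goA fuel w (k : Int) (List.range w.length) = (solveO k w).getD [] := by
  induction k with
  | zero =>
    intro fuel w _
    simp only [Nat.cast_zero]
    cases hw : w with
    | nil => simp [goA, solveO]
    | cons c cs =>
      rw [← hw]
      have hne : List.range w.length ≠ [] := by
        simp [List.range_eq_nil, hw]
      rw [goA_zero fuel w _ hne, solveO]
      have : w.isEmpty = false := by simp [hw]
      by_cases hp : pyIsPal w <;> simp [hp, this]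
  | succ k ih =>
    intro fuel w hfuel
    obtain ⟨f, rfl⟩ : ∃ f, fuel = f + 1 := ⟨fuel - 1, by omega⟩
    have hkf : k ≤ f := by omega
    rw [solveO]
    generalize List.range w.length = starts
    induction starts with
    | nil => simp [goA, solveFirst]
    | cons s rest ihs =>
      rw [goA, solveFirst]
      have hnb : (((k : Int) + 1 : Int) == 0) = false := by
        simp; omega
      have hcast : ((k + 1 : Nat) : Int) = (k : Int) + 1 := by push_cast; ring
      simp only [hcast, hnb, Bool.false_eq_true, if_false]
      by_cases hp : pyIsPal (w.take s)
      · simp only [hp, if_true]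
        have hrec : goA f (w.drop s) ((k : Int) + 1 - 1) (List.range (w.drop s).length)
            = (solveO k (w.drop s)).getD [] := by
          have h3 : ((k : Int) + 1 - 1) = (k : Int) := by ring
          rw [h3]; exact ih f (w.drop s) hkf
        simp only [List.length_drop, add_sub_cancel_right] at hrec
        cases hs : solveO k (w.drop s) with
        | some r =>
          have hr : r ≠ [] := solveO_ne_nil k _ r hs
          rw [hs] at hrec
          simp only [Option.getD_some] at hrec
          simp [hrec, hr]
        | none =>
          rw [hs] at hrec
          simp only [Option.getD_none] at hrec
          simpa [hrec] using ihs
      · simpa [hp] using ihs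

-- B's table at step k holds solveO k on every suffix
lemma tableB_inv (cs : List Char) (k : Nat) :
    ∀ i, ((levelB cs)^[k] (baseB cs)).getD i none = solveO k (cs.drop i) := by
  induction k with
  | zero =>
    intro i
    simp only [Function.iterate_zero, id_eq, baseB]
    by_cases hi : i < cs.length + 1
    · rw [List.getD_eq_getElem?_getD, List.getElem?_map, List.getElem?_range hi]
      simp only [Option.map_some, Option.getD_some]
      rw [solveO]
      by_cases hlt : i < cs.length
      · have hne : (cs.drop i).isEmpty = false := by
          rw [List.isEmpty_eq_false_iff, Ne, List.drop_eq_nil_iff]; omega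
        by_cases hp : pyIsPal (cs.drop i) <;> simp [hlt, hne, hp]
      · have hnil : cs.drop i = [] := List.drop_eq_nil_iff.mpr (by omega)
        simp [hlt, hnil]
    · rw [List.getD_eq_getElem?_getD, List.getElem?_eq_none (by simp; omega)]
      have : cs.drop i = [] := List.drop_eq_nil_iff.mpr (by omega)
      simp [this, solveO_nil]
  | succ k ih =>
    intro i
    rw [Function.iterate_succ_apply']
    set prev := (levelB cs)^[k] (baseB cs) with hprev
    have hfc : ∀ js, firstCutB cs prev i (js.map (i + ·)) = solveFirst k (cs.drop i) js := by
      intro js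
      induction js with
      | nil => simp [firstCutB, solveFirst]
      | cons s rest ihj =>
        simp only [List.map_cons]
        rw [firstCutB, solveFirst]
        have h1 : i + s - i = s := by omega
        have h2 : prev.getD (i + s) none = solveO k ((cs.drop i).drop s) := by
          rw [ih (i + s), List.drop_drop]
        simp only [h1, h2]
        by_cases hp : pyIsPal ((cs.drop i).take s)
        · simp only [hp, if_true]
          cases solveO k ((cs.drop i).drop s) <;> simp [ihj]
        · simp [hp, ihj]
    by_cases hi : i < cs.length + 1
    · rw [levelB, List.getD_eq_getElem?_getD, List.getElem?_map, List.getElem?_range hi]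
      simp only [Option.map_some, Option.getD_some]
      have hr : List.range' i (cs.length - i) = (List.range (cs.length - i)).map (i + ·) := by
        rw [List.range'_eq_map_range]
      have hlen : (cs.drop i).length = cs.length - i := by simp
      rw [hr, hfc, solveO, hlen]
    · rw [levelB, List.getD_eq_getElem?_getD, List.getElem?_eq_none (by simp; omega)]
      have hnil : cs.drop i = [] := List.drop_eq_nil_iff.mpr (by omega)
      simp [hnil, solveO_nil]

lemma alt_eq (word : String) (nb : Int) (h : 0 ≤ nb) :
    palyndrom_slices_alt word nb = ((solveO nb.toNat word.toList).getD []).map String.ofList := by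
  rw [palyndrom_slices_alt]
  rw [if_neg (by omega)]
  have := tableB_inv word.toList nb.toNat 0
  simp only [List.drop_zero] at this
  rw [this]
  cases solveO nb.toNat word.toList <;> simp

-- ===== VERDICT (by name: the statement is the Claim_ definition above) =====
theorem palyndrom_slices_spec : Claim_equal_palyndrom_slices := by
  intro word nb _dom hpre
  unfold Spec_palyndrom_slices
  rcases hpre with hw | ⟨h0, _⟩
  · subst hw
    have hnil : ("" : String).toList = [] := rfl
    rw [palyndrom_slices, hnil]
    simp only [List.length_nil, List.range_zero, goA, List.map_nil]
    rw [palyndrom_slices_alt]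
    by_cases hn : nb < 0
    · rw [if_pos hn]
    · rw [if_neg hn]
      have := tableB_inv ([] : List Char) nb.toNat 0
      simp only [List.drop_zero] at this
      simp only [hnil]
      rw [this, solveO_nil]
  · have hA := goA_eq nb.toNat nb.toNat word.toList (le_refl _)
    rw [Int.toNat_of_nonneg h0] at hA
    rw [palyndrom_slices, alt_eq word nb h0, hA]
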